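-- pv_equiv track=rewrite | github.com/lsbardel/mathfun | euler/problem92.py | problem92
-- ===== SOURCE A (Python) =====
-- from functools import reduce
--
-- def problem92(number=10000000):
--     done = (1, 89)
--     total = 0
--     cache = {}
--     for n in range(2, number):
--         process = []
--         while n not in done:
--             if n in cache:
--                 n = cache[n]
--             else:
--                 process.append(n)
--                 n = reduce(lambda x, y: x + int(y)**2, str(n), 0)
--         for p in process:
--             cache[p] = n
--         total += 1 if n == 89 else 0
--     return total
-- ===== SOURCE B (Python) =====
-- def problem92(number=10000000):
--     MAX = 811
--     def dsq(n):
--         s = 0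
--         while n > 0:
--             s += (n % 10) ** 2
--             n //= 10
--         return s
--     def endpoint(m):
--         while m != 1 and m != 89:
--             m = dsq(m)
--         return m
--     is89 = [False] + [endpoint(s) == 89 for s in range(1, MAX)]
--     return sum(1 for n in range(2, number) if is89[dsq(n)])
-- ===== Notes on version B (the rewrite author's own statement) =====
-- stated objective: faster
-- what changed: Instead of chain-walking every n with a memo dict of endpoints and string-based digit extraction, B precomputes once a boolean table classifying each possible digit-square sum (1..810) and then makes a single pass computing one arithmetic digit-square sum and one table lookup per n.
import Mathlib
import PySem

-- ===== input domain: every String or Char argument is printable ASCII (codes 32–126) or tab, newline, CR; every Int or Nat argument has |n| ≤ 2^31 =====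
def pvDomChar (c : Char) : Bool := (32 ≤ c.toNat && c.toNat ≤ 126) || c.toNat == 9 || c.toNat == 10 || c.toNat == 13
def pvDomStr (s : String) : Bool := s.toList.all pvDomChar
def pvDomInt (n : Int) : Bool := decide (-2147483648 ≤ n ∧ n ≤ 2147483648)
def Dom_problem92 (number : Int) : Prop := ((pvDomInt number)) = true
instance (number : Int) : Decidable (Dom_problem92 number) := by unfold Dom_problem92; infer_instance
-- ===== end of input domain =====

-- B replaces A's memoized per-number chain walk (dict cache, string digit extraction) by a
-- precomputed classification table of the 810 possible digit-square sums plus one arithmetic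
-- digit-square sum and table lookup per n; measurably faster by a constant factor.


-- ===== PORT A =====
-- int(y) for y a single character of str(n); exact here: every n reached is ≥ 2, so str(n) is all digits
def pvIntChar (c : Char) : Int := (PySem.Int.ofChars? [c]).getD 0

-- reduce(lambda x, y: x + int(y)**2, str(n), 0)
def pvDsqA (n : Int) : Int := (PySem.Int.toChars n).foldl (fun x y => x + (pvIntChar y)^2) 0

-- the 'while n not in done' loop; fuel is a totality guard only, proven sufficient below
def pvWhileA : Nat → Int → List Int → PySem.Dict Int Int → Int × List Int × PySem.Dict Int Int
  | 0, n, process, cache => (n, process, cache)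
  | fuel+1, n, process, cache =>
    if n ≠ 1 ∧ n ≠ 89 then
      match cache.get? n with
      | some v => pvWhileA fuel v process cache
      | none => pvWhileA fuel (pvDsqA n) (process ++ [n]) cache
    else (n, process, cache)

def problem92 (number : Int) : Int :=
  ((PySem.List.pyRange 2 number 1).foldl
    (fun (st : Int × PySem.Dict Int Int) n =>
      let r := pvWhileA (n.toNat + 20) n [] st.2
      let cache' := r.2.1.foldl (fun c p => c.insert p r.1) r.2.2
      (st.1 + (if r.1 = 89 then 1 else 0), cache'))
    (0, PySem.Dict.empty)).1

-- ===== PORT B =====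
-- Source B's arithmetic dsq: while n > 0: s += (n%10)**2; n //= 10
def pvDsqB (s n : Int) : Int :=
  if h : 0 < n then pvDsqB (s + (PySem.Int.mod n 10)^2) (PySem.Int.floordiv n 10) else s
  termination_by n.toNat
  decreasing_by
    rw [PySem.Int.floordiv_eq_ediv_of_pos (by omega : (0:Int) < 10)]
    simp; omega

-- Source B's endpoint: while m != 1 and m != 89: m = dsq(m); fuel is a totality guard, sufficient on 1..810
def pvEndB : Nat → Int → Int
  | 0, m => m
  | f+1, m => if m ≠ 1 ∧ m ≠ 89 then pvEndB f (pvDsqB 0 m) else m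

-- is89 = [False] + [endpoint(s) == 89 for s in range(1, 811)]
def pvIs89 : List Bool :=
  false :: ((PySem.List.pyRange 1 811 1).map (fun s => pvEndB (s.toNat + 20) s == 89))

def problem92_alt (number : Int) : Int :=
  (PySem.List.pyRange 2 number 1).foldl
    (fun t n => t + (if (PySem.List.pyGet? pvIs89 (pvDsqB 0 n)).getD false then 1 else 0)) 0

-- ===== PRECONDITION & SPEC =====
def Spec_problem92 (number : Int) (out : Int) : Prop := out = problem92_alt number
instance (number : Int) (out : Int) : Decidable (Spec_problem92 number out) := by unfold Spec_problem92; infer_instance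

-- ===== CLAIM (what is proved, stated in full; the proofs are below) =====
def Claim_equal_problem92 : Prop := ∀ (number : Int), Dom_problem92 number → Spec_problem92 number (problem92 number)

-- ===== LEMMAS AND PROOFS =====

-- mathematical digit-square sum on Nat (structural fuel recursion so the kernel can evaluate it)
def dsqGo : Nat → Nat → Nat
  | 0, _ => 0
  | f+1, n => if n = 0 then 0 else (n % 10)^2 + dsqGo f (n / 10)

def dsqN (n : Nat) : Nat := dsqGo n n

def doneN (n : Nat) : Bool := n == 1 || n == 89

-- reference chain with fuel
def chainF : Nat → Nat → Nat
  | 0, n => n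
  | f+1, n => if doneN n then n else chainF f (dsqN n)

theorem dsqGo_fuel : ∀ f g n, n ≤ f → n ≤ g → dsqGo f n = dsqGo g n := by
  intro f
  induction f with
  | zero =>
    intro g n hf hg
    have : n = 0 := by omega
    subst this
    cases g <;> simp [dsqGo]
  | succ f ih =>
    intro g n hf hg
    rcases Nat.eq_zero_or_pos n with h0 | h0
    · subst h0; cases g <;> simp [dsqGo]
    · obtain ⟨g', rfl⟩ : ∃ g', g = g' + 1 := ⟨g - 1, by omega⟩
      have hd : n / 10 < n := Nat.div_lt_self h0 (by omega)
      simp only [dsqGo, if_neg (by omega : ¬ n = 0)]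
      rw [ih g' (n/10) (by omega) (by omega)]

theorem dsq_step (n : Nat) (h : n ≠ 0) : dsqN n = (n % 10)^2 + dsqN (n / 10) := by
  obtain ⟨m, rfl⟩ : ∃ m, n = m + 1 := ⟨n - 1, by omega⟩
  show dsqGo (m+1) (m+1) = _
  simp only [dsqGo, if_neg h]
  rw [dsqGo_fuel m ((m+1)/10) ((m+1)/10) (by omega) (by omega)]
  rfl


def endN (n : Nat) : Nat := chainF (n + 20) n

theorem chainF_done {n : Nat} (h : doneN n = true) (f : Nat) : chainF f n = n := by
  cases f <;> simp [chainF, h]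

theorem chainF_not_done {n : Nat} (h : doneN n = false) (f : Nat) :
    chainF (f+1) n = chainF f (dsqN n) := by
  simp [chainF, h]

theorem chainF_zero (n : Nat) : chainF 0 n = n := rfl

theorem chainF_mono {f n : Nat} (h : doneN (chainF f n) = true) (k : Nat) :
    chainF (f + k) n = chainF f n := by
  induction f generalizing n with
  | zero =>
    rw [chainF_zero] at h
    rw [chainF_done h, chainF_zero]
  | succ f ih =>
    cases hd : doneN n with
    | true => rw [chainF_done hd, chainF_done hd]
    | false =>
      rw [chainF_not_done hd] at h
      have : f + 1 + k = (f + k) + 1 := by omega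
      rw [this, chainF_not_done hd, chainF_not_done hd, ih h]

theorem chainF_eq_done {f g n : Nat} (hf : doneN (chainF f n) = true)
    (hg : doneN (chainF g n) = true) : chainF f n = chainF g n := by
  rcases Nat.le_total f g with h | h
  · rw [← Nat.sub_add_cancel h, Nat.add_comm, ← chainF_mono hf]
  · rw [← Nat.sub_add_cancel h, Nat.add_comm, ← chainF_mono hg]

set_option maxRecDepth 100000 in
theorem small_term : ∀ n < 1000, 0 < n → doneN (chainF 20 n) = true := by decide

theorem dsq_zero_iff (n : Nat) : dsqN n = 0 ↔ n = 0 := by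
  induction n using Nat.strong_induction_on with
  | _ n ih =>
    rcases Nat.eq_zero_or_pos n with h | h
    · subst h; simp [dsqN, dsqGo]
    · rw [dsq_step n (by omega)]
      constructor
      · intro he
        have h2 : dsqN (n / 10) = 0 := by omega
        rcases Nat.lt_or_ge n 10 with h10 | h10
        · have : n % 10 = n := Nat.mod_eq_of_lt h10
          nlinarith [Nat.pos_iff_ne_zero.mp h]
        · have := (ih (n / 10) (Nat.div_lt_self (by omega) (by omega))).mp h2
          omega
      · intro he; omega

set_option maxRecDepth 100000 in
theorem dsq_lt_mid : ∀ n < 1000, 100 ≤ n → dsqN n < n := by decide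

theorem dsq_lt {n : Nat} (h : 100 ≤ n) : dsqN n < n := by
  induction n using Nat.strong_induction_on with
  | _ n ih =>
    rcases Nat.lt_or_ge n 1000 with h1 | h1
    · exact dsq_lt_mid n h1 h
    · have hq : 100 ≤ n / 10 := by omega
      have := ih (n / 10) (by omega) hq
      have hm : (n % 10)^2 ≤ 81 := by
        have h9 : n % 10 ≤ 9 := by omega
        calc (n % 10)^2 ≤ 9^2 := Nat.pow_le_pow_left h9 2
          _ = 81 := by norm_num
      rw [dsq_step n (by omega)]
      omega

theorem dsq_le_pow : ∀ k n, n < 10^k → dsqN n ≤ 81 * k := by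
  intro k
  induction k with
  | zero => intro n h; interval_cases n; simp [dsqN, dsqGo]
  | succ k ih =>
    intro n h
    rcases Nat.eq_zero_or_pos n with h0 | h0
    · simp [h0, dsqN, dsqGo]
    · rw [dsq_step n (by omega)]
      have hq := ih (n / 10) (by
        have : n < 10 ^ k * 10 := by rw [← pow_succ]; exact h
        omega)
      have hm : (n % 10)^2 ≤ 81 := by
        have h9 : n % 10 ≤ 9 := by omega
        calc (n % 10)^2 ≤ 9^2 := Nat.pow_le_pow_left h9 2
          _ = 81 := by norm_num
      omega

theorem terminate {n : Nat} (h : 0 < n) : doneN (chainF (n + 20) n) = true := by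
  induction n using Nat.strong_induction_on with
  | _ n ih =>
    rcases Nat.lt_or_ge n 1000 with h1 | h1
    · have := small_term n h1 h
      have : chainF (20 + n) n = chainF 20 n := chainF_mono this n
      rw [Nat.add_comm n 20, this]
      exact small_term n h1 h
    · have hd : doneN n = false := by simp [doneN]; omega
      rw [show n + 20 = (n + 19) + 1 from rfl, chainF_not_done hd]
      set m := dsqN n with hm
      have hlt : m < n := dsq_lt (by omega)
      have hpos : 0 < m := by
        have := (dsq_zero_iff n).not
        simp [Nat.pos_iff_ne_zero] at *
        omega
      have hterm := ih m hlt hpos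
      have : chainF (m + 20 + (n + 19 - (m + 20))) m = chainF (m + 20) m :=
        chainF_mono hterm _
      rw [show n + 19 = m + 20 + (n + 19 - (m + 20)) from by omega, this]
      exact hterm

theorem doneN_endN {n : Nat} (h : 0 < n) : doneN (endN n) = true := terminate h

theorem endN_done {n : Nat} (h : doneN n = true) : endN n = n := chainF_done h _

theorem endN_step {n : Nat} (hp : 0 < n) (h : doneN n = false) : endN (dsqN n) = endN n := by
  have hdp : 0 < dsqN n := by
    have := (dsq_zero_iff n).not
    simp [Nat.pos_iff_ne_zero] at *; omega
  have h1 : doneN (chainF (dsqN n + 20) (dsqN n)) = true := terminate hdp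
  have h2 : doneN (chainF (n + 20) n) = true := terminate hp
  unfold endN
  rw [show n + 20 = (n + 19) + 1 from rfl, chainF_not_done h] at h2 ⊢
  exact chainF_eq_done h1 h2

theorem endN_dsq {n : Nat} (hp : 0 < n) : endN (dsqN n) = endN n := by
  cases hd : doneN n with
  | false => exact endN_step hp hd
  | true =>
    have : n = 1 ∨ n = 89 := by simp [doneN] at hd; omega
    rcases this with rfl | rfl
    · decide
    · decide

-- ---- A's string-based digit-square sum equals dsqN ----
theorem intChar_digit : ∀ d : Nat, d < 10 → pvIntChar (Nat.digitChar d) = (d : Int) := by decide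

def sumSq (cs : List Char) : Int := (cs.map (fun c => (pvIntChar c)^2)).sum

theorem dsqN_of_div_eq_zero {m : Nat} (h : m / 10 = 0) : (dsqN m : Int) = ((m % 10 : Nat) : Int)^2 := by
  rcases Nat.eq_zero_or_pos m with h0 | h0
  · subst h0; simp [dsqN, dsqGo]
  · rw [dsq_step m (by omega), h]
    have h0 : dsqN 0 = 0 := rfl
    push_cast [h0]
    ring

theorem sumSq_toDigitsCore : ∀ f (m : Nat) (ds : List Char), m < f →
    sumSq (Nat.toDigitsCore 10 f m ds) = (dsqN m : Int) + sumSq ds := by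
  intro f
  induction f with
  | zero => omega
  | succ f ih =>
    intro m ds hm
    rw [Nat.toDigitsCore]
    by_cases h : m / 10 = 0
    · rw [if_pos h]
      have hd : pvIntChar ((m % 10).digitChar) = ((m % 10 : Nat) : Int) :=
        intChar_digit _ (by omega)
      simp [sumSq, hd, dsqN_of_div_eq_zero h]
    · rw [if_neg h]
      have hlt : m / 10 < f := by
        have : m / 10 < m := Nat.div_lt_self (by omega) (by omega)
        omega
      rw [ih (m / 10) _ hlt]
      have hd : pvIntChar ((m % 10).digitChar) = ((m % 10 : Nat) : Int) :=
        intChar_digit _ (by omega)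
      rw [dsq_step m (by omega)]
      simp [sumSq, hd]
      ring

theorem dsqA_eq (n : Int) (h : 0 ≤ n) : pvDsqA n = (dsqN n.toNat : Int) := by
  unfold pvDsqA
  rw [show PySem.Int.toChars n = Nat.toDigits 10 n.toNat by
    simp [PySem.Int.toChars, not_lt.2 h]]
  rw [PySem.List.foldl_add _ (fun c => (pvIntChar c)^2) 0]
  rw [Nat.toDigits]
  have := sumSq_toDigitsCore (n.toNat + 1) n.toNat [] (by omega)
  simp only [sumSq] at this ⊢
  simp [this]

-- ---- B's arithmetic digit-square sum equals dsqN ----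
theorem dsqB_eq : ∀ (n : Nat) (s : Int), pvDsqB s (n : Int) = s + (dsqN n : Int) := by
  intro n
  induction n using Nat.strong_induction_on with
  | _ n ih =>
    intro s
    rw [pvDsqB]
    rcases Nat.eq_zero_or_pos n with h0 | h0
    · subst h0; simp [dsqN, dsqGo]
    · rw [dif_pos (by exact_mod_cast h0)]
      rw [show (10 : Int) = ((10 : Nat) : Int) from rfl,
         PySem.Int.mod_natCast n 10, PySem.Int.floordiv_natCast n 10]
      rw [ih (n / 10) (Nat.div_lt_self h0 (by omega))]
      rw [dsq_step n (by omega)]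
      push_cast
      ring

-- ---- B's endpoint loop equals chainF ----
theorem not_done_iff (m : Nat) : ((m : Int) ≠ 1 ∧ (m : Int) ≠ 89) ↔ doneN m = false := by
  simp [doneN]
  omega

theorem endB_eq : ∀ (f : Nat) (m : Nat), pvEndB f (m : Int) = ((chainF f m : Nat) : Int) := by
  intro f
  induction f with
  | zero => intro m; rfl
  | succ f ih =>
    intro m
    rw [pvEndB]
    cases hd : doneN m with
    | true =>
      rw [if_neg (by rw [not_done_iff]; simp [hd]), chainF_done hd]
    | false =>
      rw [if_pos ((not_done_iff m).mpr hd), chainF_not_done hd, dsqB_eq m 0, ← ih (dsqN m)]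
      norm_num

-- ---- the table lookup ----
theorem is89_lookup (s : Nat) (h1 : 1 ≤ s) (h2 : s ≤ 810) :
    (PySem.List.pyGet? pvIs89 (s : Int)).getD false = (endN s == 89) := by
  unfold pvIs89
  rw [PySem.List.pyGet?_natCast]
  obtain ⟨t, rfl⟩ : ∃ t, s = t + 1 := ⟨s - 1, by omega⟩
  rw [List.getElem?_cons_succ]
  rw [PySem.List.pyRange_one]
  rw [List.map_map, List.getElem?_map, List.getElem?_range (by omega)]
  simp only [Option.map_some, Option.getD_some, Function.comp]
  have harg : ((1 + (t : Int)).toNat) = t + 1 := by omega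
  rw [show ((1 : Int) + (t : Nat)) = ((t + 1 : Nat) : Int) by push_cast; ring]
  rw [endB_eq]
  have : (t + 1 : Nat) + 20 = (t + 1) + 20 := rfl
  simp only [Int.toNat_natCast]
  unfold endN
  simp
  omega

-- ---- the digit-square sum of any admitted n lies in the table ----
theorem dsq_bound {n : Nat} (h1 : 0 < n) (h2 : n ≤ 2147483648) :
    1 ≤ dsqN n ∧ dsqN n ≤ 810 := by
  have hub := dsq_le_pow 10 n (by norm_num; omega)
  have hpos : dsqN n ≠ 0 := by
    intro h; exact absurd ((dsq_zero_iff n).mp h) (by omega)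
  norm_num at hub
  omega

-- ---- B's counting fold ----
theorem foldB (L : List Int) (hL : ∀ n ∈ L, 2 ≤ n ∧ n ≤ 2147483648) (t : Int) :
    L.foldl (fun t n => t + (if (PySem.List.pyGet? pvIs89 (pvDsqB 0 n)).getD false then 1 else 0)) t
      = t + (L.countP (fun n => endN n.toNat == 89) : Int) := by
  induction L generalizing t with
  | nil => simp
  | cons n L ih =>
    obtain ⟨hn2, hnB⟩ := hL n List.mem_cons_self
    have hcast : n = ((n.toNat : Nat) : Int) := by omega
    have hval : pvDsqB 0 n = (dsqN n.toNat : Int) := by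
      conv_lhs => rw [hcast]
      rw [dsqB_eq, zero_add]
    obtain ⟨hd1, hd2⟩ := dsq_bound (n := n.toNat) (by omega) (by omega)
    rw [List.foldl_cons, hval, is89_lookup _ hd1 hd2, endN_dsq (by omega : 0 < n.toNat)]
    rw [ih (fun m hm => hL m (List.mem_cons_of_mem n hm))]
    rw [List.countP_cons]
    by_cases h : endN n.toNat = 89
    · simp [h]; ring
    · simp [h]

-- ---- A's while loop ----
def cacheOK (c : PySem.Dict Int Int) : Prop :=
  ∀ k v, c.get? k = some v → 1 ≤ k ∧ v = ((endN k.toNat : Nat) : Int)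

theorem whileA_done (f : Nat) (m : Nat) (hd : doneN m = true) (p : List Int)
    (c : PySem.Dict Int Int) : pvWhileA f ((m : Nat) : Int) p c = (((m : Nat) : Int), p, c) := by
  cases f with
  | zero => rfl
  | succ f =>
    rw [pvWhileA, if_neg (by rw [not_done_iff]; simp [hd])]

theorem whileA_spec : ∀ (fuel : Nat) (n : Int) (p : List Int) (c : PySem.Dict Int Int),
    cacheOK c → 1 ≤ n → doneN (chainF fuel n.toNat) = true →
    ∃ ps, pvWhileA fuel n p c = (((endN n.toNat : Nat) : Int), p ++ ps, c)
      ∧ ∀ q ∈ ps, 1 ≤ q ∧ endN q.toNat = endN n.toNat := by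
  intro fuel
  induction fuel with
  | zero =>
    intro n p c _ hn hdone
    obtain ⟨m, rfl⟩ : ∃ m : Nat, n = (m : Int) := ⟨n.toNat, by omega⟩
    rw [Int.toNat_natCast] at hdone ⊢
    rw [chainF_zero] at hdone
    refine ⟨[], ?_, by simp⟩
    rw [endN_done hdone]
    simp [pvWhileA]
  | succ fuel ih =>
    intro n p c hOK hn hdone
    obtain ⟨m, rfl⟩ : ∃ m : Nat, n = (m : Int) := ⟨n.toNat, by omega⟩
    rw [Int.toNat_natCast] at hdone ⊢
    cases hd : doneN m with
    | true =>
      refine ⟨[], ?_, by simp⟩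
      rw [whileA_done _ _ hd, endN_done hd]
      simp
    | false =>
      rw [pvWhileA, if_pos ((not_done_iff m).mpr hd)]
      cases hc : c.get? (m : Int) with
      | some v =>
        obtain ⟨hk, hv⟩ := hOK _ v hc
        rw [Int.toNat_natCast] at hv
        subst hv
        refine ⟨[], ?_, by simp⟩
        have hend := whileA_done fuel (endN m) (doneN_endN (by
          have : (1 : Int) ≤ (m : Int) := hn
          omega)) p c
        simpa using hend
      | none =>
        have hm1 : 1 ≤ m := by omega
        have hdsq : pvDsqA (m : Int) = ((dsqN m : Nat) : Int) := by
          rw [dsqA_eq _ (by omega)]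
          simp
        have hpos : 0 < dsqN m := by
          have := (dsq_zero_iff m).not
          simp [Nat.pos_iff_ne_zero] at *
          omega
        have hdone' : doneN (chainF fuel (((dsqN m : Nat) : Int)).toNat) = true := by
          rw [Int.toNat_natCast]
          rw [chainF_not_done hd] at hdone
          exact hdone
        obtain ⟨ps, heq, hps⟩ := ih ((dsqN m : Nat) : Int) (p ++ [(m : Int)]) c hOK
          (by omega) hdone'
        rw [Int.toNat_natCast] at heq hps
        refine ⟨(m : Int) :: ps, ?_, ?_⟩
        · rw [hdsq, heq, endN_dsq hm1]
          simp
        · intro q hq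
          rcases List.mem_cons.mp hq with rfl | hq
          · exact ⟨hn, by simp⟩
          · obtain ⟨h1, h2⟩ := hps q hq
            rw [endN_dsq hm1] at h2
            exact ⟨h1, h2⟩

theorem cacheOK_update (ps : List Int) (e : Nat)
    (hps : ∀ q ∈ ps, 1 ≤ q ∧ endN q.toNat = e) :
    ∀ c, cacheOK c → cacheOK (ps.foldl (fun c p => c.insert p ((e : Nat) : Int)) c) := by
  induction ps with
  | nil => intro c h; exact h
  | cons q ps ih =>
    intro c hOK
    rw [List.foldl_cons]
    refine ih (fun r hr => hps r (List.mem_cons_of_mem q hr)) _ ?_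
    intro k v hk
    rw [PySem.Dict.get?_insert] at hk
    split at hk
    · obtain ⟨h1, h2⟩ := hps q List.mem_cons_self
      cases hk
      subst ‹k = q›
      exact ⟨h1, by rw [h2]⟩
    · exact hOK k v hk

theorem foldA (L : List Int) : ∀ (t : Int) (c : PySem.Dict Int Int),
    (∀ n ∈ L, 1 ≤ n) → cacheOK c →
    ∃ c', L.foldl
      (fun (st : Int × PySem.Dict Int Int) n =>
        let r := pvWhileA (n.toNat + 20) n [] st.2
        let cache' := r.2.1.foldl (fun c p => c.insert p r.1) r.2.2
        (st.1 + (if r.1 = 89 then 1 else 0), cache')) (t, c)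
      = (t + (L.countP (fun n => endN n.toNat == 89) : Int), c') ∧ cacheOK c' := by
  induction L with
  | nil => intro t c _ hOK; exact ⟨c, by simp, hOK⟩
  | cons n L ih =>
    intro t c hL hOK
    have hn : 1 ≤ n := hL n List.mem_cons_self
    obtain ⟨ps, heq, hps⟩ := whileA_spec (n.toNat + 20) n [] c hOK hn
      (terminate (by omega : 0 < n.toNat))
    rw [List.foldl_cons]
    simp only [heq, List.nil_append]
    have hOK' : cacheOK (ps.foldl (fun c p => c.insert p ((endN n.toNat : Nat) : Int)) c) :=
      cacheOK_update ps (endN n.toNat) hps c hOK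
    obtain ⟨c', hc', hOKc'⟩ := ih (t + (if ((endN n.toNat : Nat) : Int) = 89 then 1 else 0)) _
      (fun m hm => hL m (List.mem_cons_of_mem n hm)) hOK'
    refine ⟨c', ?_, hOKc'⟩
    rw [hc', List.countP_cons]
    congr 1
    by_cases h : endN n.toNat = 89
    · simp [h]; ring
    · have hne : ((endN n.toNat : Nat) : Int) ≠ 89 := by exact_mod_cast h
      simp [h, hne]

theorem cacheOK_empty : cacheOK PySem.Dict.empty := by
  intro k v hk
  simp [PySem.Dict.get?_empty] at hk

theorem problem92_spec : Claim_equal_problem92 := by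
  intro number hDom
  unfold Spec_problem92 problem92 problem92_alt
  have hB : number ≤ 2147483648 := by
    unfold Dom_problem92 pvDomInt at hDom
    simp at hDom
    omega
  have hmem : ∀ n ∈ PySem.List.pyRange 2 number 1, 2 ≤ n ∧ n < number := by
    intro n hn
    exact (PySem.List.mem_pyRange_one).mp hn
  obtain ⟨c', hA, _⟩ := foldA (PySem.List.pyRange 2 number 1) 0 PySem.Dict.empty
    (fun n hn => by have := hmem n hn; omega) cacheOK_empty
  rw [hA]
  rw [foldB _ (fun n hn => ⟨(hmem n hn).1, by have := hmem n hn; omega⟩) 0]
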